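-- pv_equiv track=rewrite | github.com/NB-Dragon/AdvancedDownloader | network/NetworkSectionHelper.py | _generate_section_list
-- ===== SOURCE A (Python) =====
-- def _generate_section_list(start_position: int, section_size_list: list):
--     result_list = list()
--     for section_size in section_size_list:
--         if section_size != 0:
--             end_position = start_position + section_size
--             result_list.append([start_position, end_position - 1])
--             start_position = end_position
--     return result_list
-- ===== SOURCE B (Python) =====
-- from itertools import accumulate
--
-- def _generate_section_list(start_position: int, section_size_list: list):
--     nonzero = [s for s in section_size_list if s != 0]
--     bounds = list(accumulate(nonzero, initial=start_position))
--     return [[bounds[i], bounds[i + 1] - 1] for i in range(len(nonzero))]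
-- ===== Notes on version B (the rewrite author's own statement) =====
-- stated objective: alternative
-- what changed: Replaced the stateful accumulator loop with a filter-nonzeros + prefix-sum boundary table (itertools.accumulate with initial=) and a separate pass pairing consecutive boundaries into [lo, hi] intervals.
import Mathlib
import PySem

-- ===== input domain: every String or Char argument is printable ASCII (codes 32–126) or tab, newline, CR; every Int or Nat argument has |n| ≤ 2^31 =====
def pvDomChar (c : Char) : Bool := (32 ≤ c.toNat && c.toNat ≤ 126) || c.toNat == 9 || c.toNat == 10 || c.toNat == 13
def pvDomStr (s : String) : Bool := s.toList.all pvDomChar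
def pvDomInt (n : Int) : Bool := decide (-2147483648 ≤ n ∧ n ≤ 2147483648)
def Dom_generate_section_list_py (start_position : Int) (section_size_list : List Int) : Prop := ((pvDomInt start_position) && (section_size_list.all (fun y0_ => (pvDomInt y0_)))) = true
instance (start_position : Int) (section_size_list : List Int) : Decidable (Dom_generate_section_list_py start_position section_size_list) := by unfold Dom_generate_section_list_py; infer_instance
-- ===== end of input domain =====

-- B replaces the stateful accumulator loop with a prefix-sum boundary table paired by index (alternative decomposition, same cost).
-- ===== PORT A =====
-- stateful accumulator loop: carries (start_position, result_list) through the list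
def generate_section_list_py (start_position : Int) (section_size_list : List Int) : List (List Int) :=
  (section_size_list.foldl
    (fun (st : Int × List (List Int)) section_size =>
      if section_size != 0 then
        let end_position := st.1 + section_size
        (end_position, st.2 ++ [[st.1, end_position - 1]])
      else st)
    (start_position, [])).2

-- ===== PORT B =====
-- B: filter the nonzero sizes, build the prefix-sum boundary table, pair consecutive boundaries
def generate_section_list_py_alt (start_position : Int) (section_size_list : List Int) : List (List Int) :=
  let nonzero := section_size_list.filter (fun s => s != 0)
  let bounds := nonzero.scanl (· + ·) start_position
  (List.range nonzero.length).map (fun i => [bounds.getD i 0, bounds.getD (i + 1) 0 - 1])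

-- ===== PRECONDITION & SPEC =====
def Spec_generate_section_list_py (start_position : Int) (section_size_list : List Int) (out : List (List Int)) : Prop := out = generate_section_list_py_alt start_position section_size_list
instance (start_position : Int) (section_size_list : List Int) (out : List (List Int)) : Decidable (Spec_generate_section_list_py start_position section_size_list out) := by unfold Spec_generate_section_list_py; infer_instance

-- ===== CLAIM (what is proved, stated in full; the proofs are below) =====
def Claim_equal_generate_section_list_py : Prop := ∀ (start_position : Int) (section_size_list : List Int), Dom_generate_section_list_py start_position section_size_list → Spec_generate_section_list_py start_position section_size_list (generate_section_list_py start_position section_size_list)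

-- ===== LEMMAS AND PROOFS =====

-- ===== VERDICT (by name: the statement is the Claim_ definition above) =====
-- reference recursion both ports are reduced to
def pvGo (s : Int) : List Int → List (List Int)
  | [] => []
  | x :: xs => if x ≠ 0 then [s, s + x - 1] :: pvGo (s + x) xs else pvGo s xs

theorem pvA_go (s : Int) (l : List Int) (acc : List (List Int)) :
    (l.foldl (fun (st : Int × List (List Int)) section_size =>
      if section_size != 0 then
        let e := st.1 + section_size
        (e, st.2 ++ [[st.1, e - 1]])
      else st) (s, acc)).2 = acc ++ pvGo s l := by
  induction l generalizing s acc with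
  | nil => simp [pvGo]
  | cons x xs ih =>
    by_cases hx : x = 0
    · rw [List.foldl_cons, if_neg (by simp [hx]), ih]
      simp [pvGo, hx]
    · rw [List.foldl_cons, if_pos (by simp [hx]), ih]
      simp [pvGo, hx]

-- pvGo on a zero-free list, in the shape B's pairing pass produces
def pvGoNZ (s : Int) : List Int → List (List Int)
  | [] => []
  | x :: xs => [s, s + x - 1] :: pvGoNZ (s + x) xs

theorem pvGo_filter (s : Int) (l : List Int) :
    pvGo s l = pvGoNZ s (l.filter (fun x => x != 0)) := by
  induction l generalizing s with
  | nil => rfl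
  | cons x xs ih =>
    by_cases hx : x = 0
    · simp [pvGo, hx, ih]
    · simp [pvGo, pvGoNZ, hx, ih]

theorem pvB_go (s : Int) (l : List Int) :
    (List.range l.length).map
      (fun i => [(l.scanl (· + ·) s).getD i 0, (l.scanl (· + ·) s).getD (i + 1) 0 - 1])
    = pvGoNZ s l := by
  induction l generalizing s with
  | nil => simp only [List.length_nil, List.range_zero, List.map_nil]; rfl
  | cons x xs ih =>
    simp only [List.length_cons, List.range_succ_eq_map, List.map_cons, List.map_map,
      List.scanl_cons, pvGoNZ]
    rw [← ih (s + x)]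
    simp [Function.comp_def]

theorem generate_section_list_py_spec : Claim_equal_generate_section_list_py := by
  intro s l _
  unfold Spec_generate_section_list_py generate_section_list_py generate_section_list_py_alt
  rw [pvA_go, pvB_go, pvGo_filter]
  simp
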